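-- pv_equiv track=rewrite | github.com/muditmu/newpygit | pass list to a function.py | count
-- ===== SOURCE A (Python) =====
-- def count(lst):
--     greater = 0
--     lesser = 0
--     for i in lst:
--         if len(i) >= 5:
--             greater += 1
--         else:
--             lesser += 1
--     return greater,lesser
-- ===== SOURCE B (Python) =====
-- def count(lst):
--     lengths = sorted(len(s) for s in lst)
--     lo, hi = 0, len(lengths)
--     while lo < hi:
--         mid = (lo + hi) // 2
--         if lengths[mid] < 5:
--             lo = mid + 1
--         else:
--             hi = mid
--     return len(lengths) - lo, lo
-- ===== Notes on version B (the rewrite author's own statement) =====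
-- stated objective: alternative
-- what changed: Sorts the string lengths and binary-searches (a hand-written bisect_left for 5) for the split point, so neither count comes from a counting loop: greater = n - split, lesser = split.
import Mathlib
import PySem

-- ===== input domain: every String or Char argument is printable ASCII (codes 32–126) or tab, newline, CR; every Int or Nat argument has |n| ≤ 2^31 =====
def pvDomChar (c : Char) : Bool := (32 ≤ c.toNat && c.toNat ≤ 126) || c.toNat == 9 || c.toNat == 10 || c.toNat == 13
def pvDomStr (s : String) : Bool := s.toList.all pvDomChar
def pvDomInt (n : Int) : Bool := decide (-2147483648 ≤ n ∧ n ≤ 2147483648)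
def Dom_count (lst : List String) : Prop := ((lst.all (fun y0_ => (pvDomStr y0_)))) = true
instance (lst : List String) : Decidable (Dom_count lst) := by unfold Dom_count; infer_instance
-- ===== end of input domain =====

-- B sorts the lengths and binary-searches for the first length >= 5 (hand-written bisect_left), deriving both counts from the split point: an alternative algorithm, not a counting pass.
-- ===== PORT A =====
def count (lst : List String) : Int × Int :=
  lst.foldl (fun (st : Int × Int) i =>
    if (PySem.Str.len i) ≥ 5 then (st.1 + 1, st.2) else (st.1, st.2 + 1)) (0, 0)

-- ===== PORT B =====
-- the while-loop of Source B: bisect_left for 5 on the sorted lengths; the index is provably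
-- in range (lo ≤ mid < hi ≤ len), so lengths[mid] is ported as pyGetD with default 0 (exact here)
def countBisect (L : List Int) (lo hi : Int) : Int :=
  if h : lo < hi then
    if PySem.List.pyGetD L (PySem.Int.floordiv (lo + hi) 2) 0 < 5 then
      countBisect L (PySem.Int.floordiv (lo + hi) 2 + 1) hi
    else
      countBisect L lo (PySem.Int.floordiv (lo + hi) 2)
  else lo
termination_by (hi - lo).toNat
decreasing_by
  · have h1 := PySem.Int.floordiv_two_mid_bounds (le_of_lt h)
    omega
  · have h1 := PySem.Int.floordiv_two_mid_bounds (le_of_lt h)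
    have h2 : PySem.Int.floordiv (lo + hi) 2 < hi := by
      rw [PySem.Int.floordiv_lt_iff_lt_mul (by omega)]; omega
    omega

def count_alt (lst : List String) : Int × Int :=
  let lengths := PySem.List.sorted (lst.map (fun s => PySem.Str.len s)) (fun x => x) false
  let lo := countBisect lengths 0 (lengths.length : Int)
  ((lengths.length : Int) - lo, lo)

-- ===== PRECONDITION & SPEC =====
def Spec_count (lst : List String) (out : Int × Int) : Prop := out = count_alt lst
instance (lst : List String) (out : Int × Int) : Decidable (Spec_count lst out) := by unfold Spec_count; infer_instance

-- ===== CLAIM (what is proved, stated in full; the proofs are below) =====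
def Claim_equal_count : Prop := ∀ (lst : List String), Dom_count lst → Spec_count lst (count lst)

-- ===== LEMMAS AND PROOFS =====

-- A's loop computes (number of lengths ≥ 5, number of lengths < 5)
lemma count_loop (lst : List String) (g l : Int) :
    lst.foldl (fun (st : Int × Int) i =>
      if (PySem.Str.len i) ≥ 5 then (st.1 + 1, st.2) else (st.1, st.2 + 1)) (g, l)
    = (g + ((lst.filter (fun i => (PySem.Str.len i) ≥ 5)).length : Int),
       l + ((lst.length : Int) - ((lst.filter (fun i => (PySem.Str.len i) ≥ 5)).length : Int))) := by
  induction lst generalizing g l with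
  | nil => simp
  | cons x xs ih =>
    by_cases h : (PySem.Str.len x) ≥ 5
    · rw [List.foldl_cons, if_pos h, ih, List.filter_cons_of_pos (by simpa using h)]
      simp only [List.length_cons, Prod.mk.injEq]
      push_cast; omega
    · rw [List.foldl_cons, if_neg h, ih, List.filter_cons_of_neg (by simpa using h)]
      simp only [List.length_cons, Prod.mk.injEq]
      push_cast; exact ⟨trivial, by omega⟩

-- in a sorted list, an element < 5 at index i forces at least i+1 elements < 5
lemma countP_ge_of_sorted (L : List Int) (hL : L.Pairwise (· ≤ ·)) (i : Nat)
    (hi : i < L.length) (h5 : L[i] < 5) :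
    i + 1 ≤ L.countP (fun x => decide (x < 5)) := by
  have hsub : (L.take (i + 1)).Sublist L := List.take_sublist _ _
  have hall : ∀ a ∈ L.take (i + 1), (fun x => decide (x < 5)) a = true := by
    intro a ha
    obtain ⟨j, hj, rfl⟩ := List.mem_iff_getElem.mp ha
    have hji : j ≤ i := by
      have := hj; simp [List.length_take] at this; omega
    have hjlen : j < L.length := by
      have := hj; simp [List.length_take] at this; omega
    rw [List.getElem_take]
    have hle : L[j] ≤ L[i] := by
      rcases lt_or_eq_of_le hji with h | h
      · exact List.pairwise_iff_getElem.mp hL j i hjlen hi h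
      · subst h; exact le_refl _
    simp; omega
  have hmono := hsub.countP_le (p := fun x => decide (x < 5))
  have htake : (L.take (i + 1)).countP (fun x => decide (x < 5)) = (L.take (i+1)).length :=
    List.countP_eq_length.mpr hall
  have hlen : (L.take (i + 1)).length = i + 1 := by
    simp [List.length_take]; omega
  omega

-- in a sorted list, an element ≥ 5 at index i forces at most i elements < 5
lemma countP_le_of_sorted (L : List Int) (hL : L.Pairwise (· ≤ ·)) (i : Nat)
    (hi : i < L.length) (h5 : ¬ L[i] < 5) :
    L.countP (fun x => decide (x < 5)) ≤ i := by
  have hsplit : L.countP (fun x => decide (x < 5))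
      = (L.take i).countP (fun x => decide (x < 5)) + (L.drop i).countP (fun x => decide (x < 5)) := by
    conv_lhs => rw [← List.take_append_drop i L]
    exact List.countP_append ..
  have hdrop : (L.drop i).countP (fun x => decide (x < 5)) = 0 := by
    rw [List.countP_eq_zero]
    intro a ha
    obtain ⟨j, hj, rfl⟩ := List.mem_iff_getElem.mp ha
    rw [List.getElem_drop]
    have hijlen : i + j < L.length := by
      have := hj; simp [List.length_drop] at this; omega
    have hle : L[i] ≤ L[i + j] := by
      rcases Nat.eq_zero_or_pos j with h | h
      · subst h; simp
      · exact List.pairwise_iff_getElem.mp hL i (i + j) hi hijlen (by omega)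
    simp; omega
  have htake : (L.take i).countP (fun x => decide (x < 5)) ≤ i := by
    have := List.countP_le_length (l := L.take i) (p := fun x => decide (x < 5))
    have : (L.take i).length ≤ i := by rw [List.length_take]; omega
    have := List.countP_le_length (l := L.take i) (p := fun x => decide (x < 5))
    omega
  omega

-- the binary search returns exactly the number of elements < 5 of the sorted list
lemma countBisect_eq (L : List Int) (hL : L.Pairwise (· ≤ ·)) :
    ∀ (n : Nat) (lo hi : Int), (hi - lo).toNat ≤ n → 0 ≤ lo →
      lo ≤ (L.countP (fun x => decide (x < 5)) : Int) →
      (L.countP (fun x => decide (x < 5)) : Int) ≤ hi → hi ≤ (L.length : Int) →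
      countBisect L lo hi = (L.countP (fun x => decide (x < 5)) : Int) := by
  intro n
  induction n with
  | zero =>
    intro lo hi hn h0 hlk hkh hhl
    rw [countBisect, dif_neg (by omega)]
    omega
  | succ m ih =>
    intro lo hi hn h0 hlk hkh hhl
    by_cases h : lo < hi
    · have hmid := PySem.Int.floordiv_two_mid_bounds (le_of_lt h)
      have hmidlt : PySem.Int.floordiv (lo + hi) 2 < hi := by
        rw [PySem.Int.floordiv_lt_iff_lt_mul (by omega)]; omega
      set mid := PySem.Int.floordiv (lo + hi) 2 with hmiddef
      have hmid0 : 0 ≤ mid := by omega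
      have hmidlen : mid < (L.length : Int) := by omega
      have hget : PySem.List.pyGetD L mid 0 = L[mid.toNat] :=
        PySem.List.pyGetD_eq_getElem (xs := L) (i := mid) (d := 0) hmid0 (by omega)
      have hidx : mid.toNat < L.length := by omega
      rw [countBisect, dif_pos h, ← hmiddef, hget]
      by_cases h5 : L[mid.toNat] < 5
      · rw [if_pos h5]
        have hge := countP_ge_of_sorted L hL mid.toNat hidx h5
        exact ih (mid + 1) hi (by omega) (by omega) (by omega) hkh hhl
      · rw [if_neg h5]
        have hle := countP_le_of_sorted L hL mid.toNat hidx h5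
        exact ih lo mid (by omega) h0 hlk (by omega) (by omega)
    · rw [countBisect, dif_neg h]
      omega

-- ===== VERDICT (by name: the statement is the Claim_ definition above) =====
theorem count_spec : Claim_equal_count := by
  intro lst _
  unfold Spec_count count count_alt
  set M := lst.map (fun s => PySem.Str.len s) with hM
  set L := PySem.List.sorted M (fun x => x) false with hLdef
  have hperm : L.Perm M := PySem.List.sorted_perm ..
  have hpw : L.Pairwise (· ≤ ·) := by
    have := PySem.List.sorted_pairwise (xs := M) (key := fun x => x)
    simpa using this
  have hlen : L.length = lst.length := by
    rw [hperm.length_eq, hM, List.length_map]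
  have hk : L.countP (fun x => decide (x < 5)) = lst.countP (fun s => decide (PySem.Str.len s < 5)) := by
    rw [hperm.countP_eq, hM, List.countP_map]
    rfl
  have hkle : L.countP (fun x => decide (x < 5)) ≤ L.length := List.countP_le_length ..
  have hbs := countBisect_eq L hpw (L.length) 0 (L.length : Int)
    (by omega) (by omega) (by exact_mod_cast Int.natCast_nonneg _) (by exact_mod_cast hkle) le_rfl
  have hfilter : (lst.filter (fun i => decide (PySem.Str.len i ≥ 5))).length
      = lst.countP (fun i => decide (PySem.Str.len i ≥ 5)) := (List.countP_eq_length_filter ..).symm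
  have hcompl : lst.countP (fun i => decide (PySem.Str.len i ≥ 5))
      + lst.countP (fun s => decide (PySem.Str.len s < 5)) = lst.length := by
    have h1 : lst.countP (fun s => decide (PySem.Str.len s < 5))
        = lst.countP (fun a => !decide (PySem.Str.len a ≥ 5)) := by
      apply List.countP_congr
      intro a _
      simp
    rw [h1]
    have h2 := List.length_eq_countP_add_countP (p := fun i => decide (PySem.Str.len i ≥ 5)) (l := lst)
    simp only [decide_not, Bool.decide_eq_true] at h2 ⊢
    omega
  rw [count_loop]
  simp only [zero_add]
  rw [hbs, hk]
  simp only [Prod.mk.injEq]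
  constructor
  · rw [hfilter]; omega
  · rw [hfilter]; omega
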